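-- pv_equiv track=rewrite | github.com/homulily85/NumberlinkSolver | converter.py | variable_generator
-- ===== SOURCE A (Python) =====
-- def variable_generator(n: int, k: int):
--     index = 0
--     variables = []
--     for i in range(n):
--         t1 = []
--         for j in range(n):
--             t2 = []
--             for m in range(4):
--                 t2.append(index + i * n + j + m + 1)
--             index += 4
--             for m in range(k):
--                 t2.append(index + i * n + j + m + 1)
--             index += (k - 1)
--             t1.append(t2)
--         variables.append(t1)
--     return variables
-- ===== SOURCE B (Python) =====
-- def variable_generator(n: int, k: int):
--     def cell(i, j):
--         base = (i * n + j) * (k + 3) + i * n + j + 1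
--         return list(range(base, base + 4)) + list(range(base + 4, base + 4 + k))
--     return [[cell(i, j) for j in range(n)] for i in range(n)]
-- ===== Notes on version B (the rewrite author's own statement) =====
-- stated objective: simpler
-- what changed: Replaces A's running index accumulator threaded across all three loops by a per-cell closed-form base (i*n+j)*(k+3)+i*n+j+1, so each cell's list is built from two ranges with no inter-iteration state.
import Mathlib
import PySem

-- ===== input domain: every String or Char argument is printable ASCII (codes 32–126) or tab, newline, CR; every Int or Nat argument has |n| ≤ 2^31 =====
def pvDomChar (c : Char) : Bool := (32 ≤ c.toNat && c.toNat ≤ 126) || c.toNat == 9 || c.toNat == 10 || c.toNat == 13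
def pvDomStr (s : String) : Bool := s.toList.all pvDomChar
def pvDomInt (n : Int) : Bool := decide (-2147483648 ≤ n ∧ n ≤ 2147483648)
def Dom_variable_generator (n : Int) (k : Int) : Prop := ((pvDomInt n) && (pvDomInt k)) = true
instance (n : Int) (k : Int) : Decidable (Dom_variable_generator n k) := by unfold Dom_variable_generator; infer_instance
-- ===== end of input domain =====

-- B replaces A's running `index` accumulator by a per-cell closed-form base, building each cell list from two ranges with no inter-iteration state (objective: simpler).

-- ===== PORT A =====
def variable_generator (n : Int) (k : Int) : List (List (List Int)) :=
  ((PySem.List.pyRange 0 n 1).foldl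
    (fun (st : Int × List (List (List Int))) i =>
      let inner := (PySem.List.pyRange 0 n 1).foldl
        (fun (st2 : Int × List (List Int)) j =>
          let t2 := (PySem.List.pyRange 0 4 1).foldl
            (fun (t2 : List Int) m => t2 ++ [st2.1 + i * n + j + m + 1]) []
          let index := st2.1 + 4
          let t2 := (PySem.List.pyRange 0 k 1).foldl
            (fun (t2 : List Int) m => t2 ++ [index + i * n + j + m + 1]) t2
          (index + (k - 1), st2.2 ++ [t2]))
        (st.1, [])
      (inner.1, st.2 ++ [inner.2]))
    (0, [])).2

-- ===== PORT B =====
def variable_generator_alt (n : Int) (k : Int) : List (List (List Int)) :=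
  (PySem.List.pyRange 0 n 1).map (fun i =>
    (PySem.List.pyRange 0 n 1).map (fun j =>
      let base := (i * n + j) * (k + 3) + i * n + j + 1
      PySem.List.pyRange base (base + 4) 1 ++ PySem.List.pyRange (base + 4) (base + 4 + k) 1))

-- ===== PRECONDITION & SPEC =====
def Spec_variable_generator (n : Int) (k : Int) (out : List (List (List Int))) : Prop := out = variable_generator_alt n k
instance (n : Int) (k : Int) (out : List (List (List Int))) : Decidable (Spec_variable_generator n k out) := by unfold Spec_variable_generator; infer_instance

-- ===== CLAIM (what is proved, stated in full; the proofs are below) =====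
def Claim_equal_variable_generator : Prop := ∀ (n : Int) (k : Int), Dom_variable_generator n k → Spec_variable_generator n k (variable_generator n k)

-- ===== LEMMAS AND PROOFS =====

-- B's per-cell value, named for the proofs (definitionally the body of variable_generator_alt's inner map).
def pvCellB (n k i j : Int) : List Int :=
  let base := (i * n + j) * (k + 3) + i * n + j + 1
  PySem.List.pyRange base (base + 4) 1 ++ PySem.List.pyRange (base + 4) (base + 4 + k) 1

lemma pvCell_eq (n k i j s : Int) (hs : s = (i * n + j) * (k + 3)) :
    (PySem.List.pyRange 0 k 1).foldl
      (fun (t2 : List Int) m => t2 ++ [s + 4 + i * n + j + m + 1])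
      ((PySem.List.pyRange 0 4 1).foldl
        (fun (t2 : List Int) m => t2 ++ [s + i * n + j + m + 1]) [])
    = pvCellB n k i j := by
  subst hs
  simp only [PySem.List.foldl_append_singleton_eq_map, List.nil_append, pvCellB,
    PySem.List.pyRange_one, List.map_map]
  have hb : ∀ b : Int, (b + 4 - b).toNat = ((0:Int) + 4 - 0).toNat := by intro b; omega
  have hk : ∀ b : Int, (b + 4 + k - (b + 4)).toNat = (k - 0).toNat := by intro b; omega
  rw [hb, hk]
  congr 1 <;> apply List.map_congr_left <;> intro t _ <;>
    simp only [Function.comp_apply] <;> ring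

-- Inner loop: fold over a consecutive j-range starting at index s = (i*n + a)*(k+3) appends B's cells and advances the index by (k+3) per cell.
lemma pvInner (n k i : Int) : ∀ (cnt : Nat) (a b s : Int) (acc : List (List Int)),
    (b - a).toNat = cnt → s = (i * n + a) * (k + 3) →
    (PySem.List.pyRange a b 1).foldl
      (fun (st2 : Int × List (List Int)) j =>
        (st2.1 + 4 + (k - 1),
         st2.2 ++ [(PySem.List.pyRange 0 k 1).foldl
           (fun (t2 : List Int) m => t2 ++ [st2.1 + 4 + i * n + j + m + 1])
           ((PySem.List.pyRange 0 4 1).foldl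
             (fun (t2 : List Int) m => t2 ++ [st2.1 + i * n + j + m + 1]) [])]))
      (s, acc)
    = (s + cnt * (k + 3), acc ++ (PySem.List.pyRange a b 1).map (fun j => pvCellB n k i j)) := by
  intro cnt
  induction cnt with
  | zero =>
    intro a b s acc hcnt hs
    rw [PySem.List.pyRange_one_eq_nil (a := a) (b := b) (by omega)]
    simp
  | succ m ih =>
    intro a b s acc hcnt hs
    rw [PySem.List.pyRange_one_cons (a := a) (b := b) (by omega)]
    rw [List.foldl_cons, List.map_cons]
    dsimp only
    rw [pvCell_eq n k i a s hs]
    rw [ih (a + 1) b (s + 4 + (k - 1)) (acc ++ [pvCellB n k i a]) (by omega)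
      (by rw [hs]; ring)]
    refine congrArg₂ Prod.mk ?_ ?_
    · push_cast; ring
    · simp

-- Outer loop: each row advances the index by n*(k+3) (n ≥ 0) and appends B's row.
lemma pvOuter (n k : Int) (hn : 0 ≤ n) : ∀ (cnt : Nat) (a s : Int) (acc : List (List (List Int))),
    (n - a).toNat = cnt → s = a * n * (k + 3) →
    (PySem.List.pyRange a n 1).foldl
      (fun (st : Int × List (List (List Int))) i =>
        (((PySem.List.pyRange 0 n 1).foldl
            (fun (st2 : Int × List (List Int)) j =>
              (st2.1 + 4 + (k - 1),
               st2.2 ++ [(PySem.List.pyRange 0 k 1).foldl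
                 (fun (t2 : List Int) m => t2 ++ [st2.1 + 4 + i * n + j + m + 1])
                 ((PySem.List.pyRange 0 4 1).foldl
                   (fun (t2 : List Int) m => t2 ++ [st2.1 + i * n + j + m + 1]) [])]))
            (st.1, [])).1,
         st.2 ++ [((PySem.List.pyRange 0 n 1).foldl
            (fun (st2 : Int × List (List Int)) j =>
              (st2.1 + 4 + (k - 1),
               st2.2 ++ [(PySem.List.pyRange 0 k 1).foldl
                 (fun (t2 : List Int) m => t2 ++ [st2.1 + 4 + i * n + j + m + 1])
                 ((PySem.List.pyRange 0 4 1).foldl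
                   (fun (t2 : List Int) m => t2 ++ [st2.1 + i * n + j + m + 1]) [])]))
            (st.1, [])).2]))
      (s, acc)
    = (s + cnt * (n * (k + 3)),
       acc ++ (PySem.List.pyRange a n 1).map (fun i =>
         (PySem.List.pyRange 0 n 1).map (fun j => pvCellB n k i j))) := by
  intro cnt
  induction cnt with
  | zero =>
    intro a s acc hcnt hs
    rw [PySem.List.pyRange_one_eq_nil (a := a) (b := n) (by omega)]
    simp
  | succ m ih =>
    intro a s acc hcnt hs
    have hcast : (n.toNat : Int) = n := by omega
    rw [PySem.List.pyRange_one_cons (a := a) (b := n) (by omega)]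
    rw [List.foldl_cons, List.map_cons]
    dsimp only
    rw [pvInner n k a n.toNat 0 n s [] (by omega) (by rw [hs]; ring)]
    dsimp only
    rw [List.nil_append]
    rw [ih (a + 1) (s + (n.toNat : Int) * (k + 3))
      (acc ++ [(PySem.List.pyRange 0 n 1).map (fun j => pvCellB n k a j)])
      (by omega) (by rw [hs, hcast]; ring)]
    refine congrArg₂ Prod.mk ?_ ?_
    · rw [hcast]; push_cast; ring
    · simp

-- ===== VERDICT (by name: the statement is the Claim_ definition above) =====
theorem variable_generator_spec : Claim_equal_variable_generator := by
  intro n k _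
  unfold Spec_variable_generator variable_generator variable_generator_alt
  by_cases hn : 0 ≤ n
  · dsimp only
    rw [pvOuter n k hn n.toNat 0 0 [] (by omega) (by ring)]
    simp [pvCellB]
  · rw [PySem.List.pyRange_one_eq_nil (a := 0) (b := n) (by omega)]
    simp
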